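-- pv_equiv track=rewrite | github.com/Pothula-Kalyani-ML/pothula-dot-kalyani | trainingPrograms/module3_programs/prg8_lcm_hcf_primefactors.py | required_factors
-- ===== SOURCE A (Python) =====
-- def required_factors(factors_1num, factors_2num):
--     required_factors_hcf = []
--     required_factors_lcm = []
--     complete_factors = factors_1num+factors_2num
--     for item in factors_1num:
--         if item in factors_2num:
--             required_factors_hcf.append(item)
--             factors_2num.remove(item)
--     for item in required_factors_hcf:
--        complete_factors.remove(item)
--     required_factors_lcm.extend(complete_factors)
--     return required_factors_lcm, required_factors_hcf
-- ===== SOURCE B (Python) =====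
-- def required_factors(factors_1num, factors_2num):
--     orig2 = list(factors_2num)
--     counts = {}
--     for v in factors_2num:
--         counts[v] = counts.get(v, 0) + 1
--     required_factors_hcf = []
--     required_factors_lcm = []
--     for item in factors_1num:
--         c = counts.get(item, 0)
--         if c > 0:
--             counts[item] = c - 1
--             required_factors_hcf.append(item)
--             factors_2num.remove(item)  # keep A's in-place mutation
--         else:
--             required_factors_lcm.append(item)
--     required_factors_lcm.extend(orig2)
--     return required_factors_lcm, required_factors_hcf
-- ===== Notes on version B (the rewrite author's own statement) =====
-- stated objective: faster
-- what changed: Single pass over factors_1num with a count dictionary of factors_2num replaces A's membership scan plus a second remove-loop over the concatenated list; unmatched items of factors_1num followed by the original factors_2num are proved to equal A's LCM list.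
import Mathlib
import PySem

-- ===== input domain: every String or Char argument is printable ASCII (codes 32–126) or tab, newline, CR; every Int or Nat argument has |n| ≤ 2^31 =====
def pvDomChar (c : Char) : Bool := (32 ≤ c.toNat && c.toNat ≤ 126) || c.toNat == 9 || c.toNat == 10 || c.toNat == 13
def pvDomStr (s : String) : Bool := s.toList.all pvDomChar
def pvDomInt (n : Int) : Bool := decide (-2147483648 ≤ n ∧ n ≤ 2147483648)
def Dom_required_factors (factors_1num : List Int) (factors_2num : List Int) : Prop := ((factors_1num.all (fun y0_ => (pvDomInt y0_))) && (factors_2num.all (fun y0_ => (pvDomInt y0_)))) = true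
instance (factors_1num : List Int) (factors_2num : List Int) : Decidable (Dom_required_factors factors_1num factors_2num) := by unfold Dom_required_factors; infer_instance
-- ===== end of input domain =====

-- B replaces A's 'item in factors_2num' scans and second remove-loop over factors_1num+factors_2num
-- by one counted pass over factors_1num; equivalence of the RETURN value is proved (both Pythons
-- also remove matched items from factors_2num in place, identically).

-- ===== PORT A =====
-- first loop of A: state = (hcf so far, current factors_2num); list.remove is PySem.List.remove?,
-- guarded by the membership test so it is always 'some' (getD is never the fallback)
def requiredFactorsMatch : List Int → List Int → List Int → List Int × List Int
  | [], hcf, f2 => (hcf, f2)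
  | item :: rest, hcf, f2 =>
    if item ∈ f2 then
      requiredFactorsMatch rest (hcf ++ [item]) ((PySem.List.remove? f2 item).getD f2)
    else requiredFactorsMatch rest hcf f2

def required_factors (factors_1num : List Int) (factors_2num : List Int) : List Int × List Int :=
  let complete_factors := factors_1num ++ factors_2num
  let hcf := (requiredFactorsMatch factors_1num [] factors_2num).1
  -- second loop: complete_factors.remove(item); every hcf item is present (proved below), so getD never falls back
  let complete_factors := hcf.foldl (fun c item => (PySem.List.remove? c item).getD c) complete_factors
  (([] : List Int) ++ complete_factors, hcf)

-- ===== PORT B =====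
def required_factors_alt (factors_1num : List Int) (factors_2num : List Int) : List Int × List Int :=
  -- counts[v] = counts.get(v, 0) + 1 over factors_2num
  let counts := factors_2num.foldl (fun d v => d.insert v (d.getD v 0 + 1)) (PySem.Dict.empty : PySem.Dict Int Int)
  -- one pass over factors_1num carrying (counts, hcf, lcm); the in-place factors_2num.remove is a
  -- side effect on the argument only and does not enter the returned value
  let s := factors_1num.foldl
    (fun (s : PySem.Dict Int Int × List Int × List Int) item =>
      let c := s.1.getD item 0
      if c > 0 then (s.1.insert item (c - 1), s.2.1 ++ [item], s.2.2)
      else (s.1, s.2.1, s.2.2 ++ [item]))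
    (counts, ([], []))
  (s.2.2 ++ factors_2num, s.2.1)

-- ===== PRECONDITION & SPEC =====
def Spec_required_factors (factors_1num : List Int) (factors_2num : List Int) (out : List Int × List Int) : Prop := out = required_factors_alt factors_1num factors_2num
instance (factors_1num : List Int) (factors_2num : List Int) (out : List Int × List Int) : Decidable (Spec_required_factors factors_1num factors_2num out) := by unfold Spec_required_factors; infer_instance

-- ===== CLAIM (what is proved, stated in full; the proofs are below) =====
def Claim_equal_required_factors : Prop := ∀ (factors_1num : List Int) (factors_2num : List Int), Dom_required_factors factors_1num factors_2num → Spec_required_factors factors_1num factors_2num (required_factors factors_1num factors_2num)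

-- ===== LEMMAS AND PROOFS =====

-- common spec: (unmatched f1 items in order, matched f1 items in order) against a shrinking f2
def goUM : List Int → List Int → List Int × List Int
  | [], _ => ([], [])
  | x :: xs, f2 =>
    if x ∈ f2 then ((goUM xs (f2.erase x)).1, x :: (goUM xs (f2.erase x)).2)
    else (x :: (goUM xs f2).1, (goUM xs f2).2)

theorem requiredFactorsMatch_fst (f1 : List Int) : ∀ (hcf f2 : List Int),
    (requiredFactorsMatch f1 hcf f2).1 = hcf ++ (goUM f1 f2).2 := by
  induction f1 with
  | nil => intro hcf f2; simp [requiredFactorsMatch, goUM]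
  | cons x xs ih =>
    intro hcf f2
    by_cases h : x ∈ f2
    · rw [requiredFactorsMatch, if_pos h, PySem.List.remove?_eq_some_erase f2 x h]
      simp only [goUM, if_pos h, Option.getD_some, ih]
      simp
    · rw [requiredFactorsMatch, if_neg h]
      simp only [goUM, if_neg h, ih]

theorem goUM_matched_count_le (f1 : List Int) : ∀ (f2 : List Int) (v : Int),
    ((goUM f1 f2).2).count v ≤ f2.count v := by
  induction f1 with
  | nil => intro f2 v; simp [goUM]
  | cons x xs ih =>
    intro f2 v
    by_cases h : x ∈ f2
    · simp only [goUM, if_pos h]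
      have hih := ih (f2.erase x) v
      by_cases hv : v = x
      · subst hv
        have hc : (f2.erase v).count v = f2.count v - 1 := List.count_erase_self
        have hpos : 0 < f2.count v := List.count_pos_iff.mpr h
        simp only [List.count_cons_self]
        omega
      · have hc : (f2.erase x).count v = f2.count v := List.count_erase_of_ne hv
        rw [List.count_cons_of_ne (Ne.symm hv)]
        omega
    · simp only [goUM, if_neg h]
      exact ih f2 v

theorem goUM_matched_count_le_left (f1 : List Int) : ∀ (f2 : List Int) (v : Int),
    ((goUM f1 f2).2).count v ≤ f1.count v := by
  induction f1 with
  | nil => intro f2 v; simp [goUM]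
  | cons x xs ih =>
    intro f2 v
    by_cases h : x ∈ f2
    · simp only [goUM, if_pos h]
      by_cases hv : v = x
      · subst hv; simp only [List.count_cons_self]
        have := ih (f2.erase v) v; omega
      · rw [List.count_cons_of_ne (Ne.symm hv), List.count_cons_of_ne (Ne.symm hv)]
        exact ih (f2.erase x) v
    · simp only [goUM, if_neg h]
      by_cases hv : v = x
      · subst hv; simp only [List.count_cons_self]
        have := ih f2 v; omega
      · rw [List.count_cons_of_ne (Ne.symm hv)]
        exact ih f2 v

-- erasing elements all different from x passes over a leading x
theorem eraseFold_cons_of_not_mem (m : List Int) : ∀ (x : Int) (xs : List Int), x ∉ m →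
    m.foldl (fun c a => c.erase a) (x :: xs) = x :: m.foldl (fun c a => c.erase a) xs := by
  induction m with
  | nil => intro x xs _; rfl
  | cons a m ih =>
    intro x xs hx
    have hax : ¬ (x == a) = true := by
      simp only [beq_iff_eq]
      intro h; exact hx (h ▸ List.mem_cons_self)
    simp only [List.foldl_cons, List.erase_cons, hax, if_neg, Bool.not_eq_true]
    exact ih x (xs.erase a) (fun h => hx (List.mem_cons_of_mem a h))

-- a sequence of erases of a sub-multiset of xs never touches the appended tail
theorem eraseFold_append (m : List Int) : ∀ (xs t : List Int),
    (∀ v, m.count v ≤ xs.count v) →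
    m.foldl (fun c a => c.erase a) (xs ++ t) = m.foldl (fun c a => c.erase a) xs ++ t := by
  induction m with
  | nil => intro xs t _; rfl
  | cons a m ih =>
    intro xs t h
    have ha : a ∈ xs := by
      have := h a; simp only [List.count_cons_self] at this
      exact List.count_pos_iff.mp (by omega)
    have hcnt : ∀ v, m.count v ≤ (xs.erase a).count v := by
      intro v
      have hv := h v
      by_cases hva : v = a
      · subst hva
        have h1 : (xs.erase v).count v = xs.count v - 1 := List.count_erase_self
        simp only [List.count_cons_self] at hv; omega
      · have h1 : (xs.erase a).count v = xs.count v := List.count_erase_of_ne hva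
        rw [List.count_cons_of_ne (Ne.symm hva)] at hv; omega
    simp only [List.foldl_cons, List.erase_append_left _ ha]
    exact ih (xs.erase a) t hcnt

-- erasing the matched items from f1 itself leaves exactly the unmatched items
theorem eraseFold_matched (f1 : List Int) : ∀ (f2 : List Int),
    ((goUM f1 f2).2).foldl (fun c a => c.erase a) f1 = (goUM f1 f2).1 := by
  induction f1 with
  | nil => intro f2; simp [goUM]
  | cons x xs ih =>
    intro f2
    by_cases h : x ∈ f2
    · simp only [goUM, if_pos h, List.foldl_cons, List.erase_cons_head]
      exact ih (f2.erase x)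
    · have hx0 : x ∉ (goUM xs f2).2 := by
        have hle := goUM_matched_count_le xs f2 x
        have h0 : f2.count x = 0 := List.count_eq_zero.mpr h
        intro hmem
        have := List.count_pos_iff.mpr hmem
        omega
      simp only [goUM, if_neg h]
      rw [eraseFold_cons_of_not_mem _ x xs hx0, ih f2]

-- A's remove?/getD fold equals the plain erase fold whenever the removed items form a sub-multiset
theorem removeFold_eq_eraseFold (m : List Int) : ∀ (c : List Int),
    (∀ v, m.count v ≤ c.count v) →
    m.foldl (fun c item => (PySem.List.remove? c item).getD c) c = m.foldl (fun c a => c.erase a) c := by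
  induction m with
  | nil => intro c _; rfl
  | cons a m ih =>
    intro c h
    have ha : a ∈ c := by
      have := h a; simp only [List.count_cons_self] at this
      exact List.count_pos_iff.mp (by omega)
    have hcnt : ∀ v, m.count v ≤ (c.erase a).count v := by
      intro v
      have hv := h v
      by_cases hva : v = a
      · subst hva
        have h1 : (c.erase v).count v = c.count v - 1 := List.count_erase_self
        simp only [List.count_cons_self] at hv; omega
      · have h1 : (c.erase a).count v = c.count v := List.count_erase_of_ne hva
        rw [List.count_cons_of_ne (Ne.symm hva)] at hv; omega
    simp only [List.foldl_cons, PySem.List.remove?_eq_some_erase c a ha, Option.getD_some]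
    exact ih (c.erase a) hcnt

-- B's single pass, under the invariant that the dictionary counts the current f2
theorem altLoop_eq (f1 : List Int) : ∀ (d : PySem.Dict Int Int) (f2c hcf lcm : List Int),
    (∀ v, d.getD v 0 = (f2c.count v : Int)) →
    f1.foldl
      (fun (s : PySem.Dict Int Int × List Int × List Int) item =>
        let c := s.1.getD item 0
        if c > 0 then (s.1.insert item (c - 1), s.2.1 ++ [item], s.2.2)
        else (s.1, s.2.1, s.2.2 ++ [item]))
      (d, (hcf, lcm))
    = ((f1.foldl
      (fun (s : PySem.Dict Int Int × List Int × List Int) item =>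
        let c := s.1.getD item 0
        if c > 0 then (s.1.insert item (c - 1), s.2.1 ++ [item], s.2.2)
        else (s.1, s.2.1, s.2.2 ++ [item]))
      (d, (hcf, lcm))).1, (hcf ++ (goUM f1 f2c).2, lcm ++ (goUM f1 f2c).1)) := by
  induction f1 with
  | nil => intro d f2c hcf lcm _; simp [goUM]
  | cons x xs ih =>
    intro d f2c hcf lcm hinv
    by_cases h : x ∈ f2c
    · have hpos : d.getD x 0 > 0 := by
        rw [hinv x]
        exact_mod_cast List.count_pos_iff.mpr h
      have hinv' : ∀ v, (d.insert x (d.getD x 0 - 1)).getD v 0 = ((f2c.erase x).count v : Int) := by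
        intro v
        rw [PySem.Dict.getD_insert]
        by_cases hv : v = x
        · subst hv
          rw [if_pos rfl, hinv v]
          have h1 : (f2c.erase v).count v = f2c.count v - 1 := List.count_erase_self
          have hpos2 : 0 < f2c.count v := List.count_pos_iff.mpr h
          rw [h1]
          omega
        · rw [if_neg hv, hinv v, List.count_erase_of_ne hv]
      simp only [List.foldl_cons, goUM, if_pos h, gt_iff_lt, hpos, if_pos]
      rw [ih _ (f2c.erase x) (hcf ++ [x]) lcm hinv']
      simp
    · have hneg : ¬ d.getD x 0 > 0 := by
        rw [hinv x]
        have h0 : f2c.count x = 0 := List.count_eq_zero.mpr h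
        simp [h0]
      simp only [List.foldl_cons, goUM, if_neg h, gt_iff_lt, hneg, if_neg, not_false_iff]
      rw [ih d f2c hcf (lcm ++ [x]) hinv]
      simp

theorem alt_eq_goUM (f1 f2 : List Int) :
    required_factors_alt f1 f2 = ((goUM f1 f2).1 ++ f2, (goUM f1 f2).2) := by
  have hcounts : ∀ v, (f2.foldl (fun d v => d.insert v (d.getD v 0 + 1))
      (PySem.Dict.empty : PySem.Dict Int Int)).getD v 0 = (f2.count v : Int) := by
    intro v
    rw [PySem.Dict.foldl_insert_getD_add_one_eq_counter, PySem.Dict.getD_counter]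
  show ((f1.foldl
      (fun (s : PySem.Dict Int Int × List Int × List Int) item =>
        let c := s.1.getD item 0
        if c > 0 then (s.1.insert item (c - 1), s.2.1 ++ [item], s.2.2)
        else (s.1, s.2.1, s.2.2 ++ [item]))
      (f2.foldl (fun d v => d.insert v (d.getD v 0 + 1)) (PySem.Dict.empty : PySem.Dict Int Int), ([], []))).2.2 ++ f2,
    (f1.foldl
      (fun (s : PySem.Dict Int Int × List Int × List Int) item =>
        let c := s.1.getD item 0
        if c > 0 then (s.1.insert item (c - 1), s.2.1 ++ [item], s.2.2)
        else (s.1, s.2.1, s.2.2 ++ [item]))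
      (f2.foldl (fun d v => d.insert v (d.getD v 0 + 1)) (PySem.Dict.empty : PySem.Dict Int Int), ([], []))).2.1)
    = ((goUM f1 f2).1 ++ f2, (goUM f1 f2).2)
  rw [altLoop_eq f1 _ f2 [] [] hcounts]
  simp

theorem a_eq_goUM (f1 f2 : List Int) :
    required_factors f1 f2 = ((goUM f1 f2).1 ++ f2, (goUM f1 f2).2) := by
  show (([] : List Int) ++ ((requiredFactorsMatch f1 [] f2).1).foldl
      (fun c item => (PySem.List.remove? c item).getD c) (f1 ++ f2),
    (requiredFactorsMatch f1 [] f2).1) = ((goUM f1 f2).1 ++ f2, (goUM f1 f2).2)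
  rw [requiredFactorsMatch_fst f1 [] f2]
  simp only [List.nil_append]
  have hsub : ∀ v, ((goUM f1 f2).2).count v ≤ (f1 ++ f2).count v := by
    intro v
    have := goUM_matched_count_le_left f1 f2 v
    simp only [List.count_append]
    omega
  rw [removeFold_eq_eraseFold _ _ hsub,
    eraseFold_append _ _ _ (goUM_matched_count_le_left f1 f2), eraseFold_matched]

-- ===== VERDICT (by name: the statement is the Claim_ definition above) =====
theorem required_factors_spec : Claim_equal_required_factors := by
  intro f1 f2 _
  unfold Spec_required_factors
  rw [a_eq_goUM, alt_eq_goUM]
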